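-- pv_equiv track=rewrite | github.com/gbasin/ffgpt | analyze_gate.py | has_carry
-- ===== SOURCE A (Python) =====
-- def has_carry(a: int, b: int, position: int) -> bool:
--     """Check if adding a+b produces a carry at a given digit position (0=ones)."""
--     carry = 0
--     for pos in range(position + 1):
--         d_a = (a // (10 ** pos)) % 10
--         d_b = (b // (10 ** pos)) % 10
--         total = d_a + d_b + carry
--         carry = total // 10
--         if pos == position:
--             return carry > 0
--     return False
-- ===== SOURCE B (Python) =====
-- def has_carry(a: int, b: int, position: int) -> bool:
--     """Check if adding a+b produces a carry at a given digit position (0=ones)."""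
--     if position < 0:
--         return False
--     m = 10 ** (position + 1)
--     return a % m + b % m >= m
-- ===== Notes on version B (the rewrite author's own statement) =====
-- stated objective: faster
-- what changed: Replaced the digit-by-digit carry-propagation loop with the closed-form test a % 10^(p+1) + b % 10^(p+1) >= 10^(p+1).
import Mathlib
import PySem

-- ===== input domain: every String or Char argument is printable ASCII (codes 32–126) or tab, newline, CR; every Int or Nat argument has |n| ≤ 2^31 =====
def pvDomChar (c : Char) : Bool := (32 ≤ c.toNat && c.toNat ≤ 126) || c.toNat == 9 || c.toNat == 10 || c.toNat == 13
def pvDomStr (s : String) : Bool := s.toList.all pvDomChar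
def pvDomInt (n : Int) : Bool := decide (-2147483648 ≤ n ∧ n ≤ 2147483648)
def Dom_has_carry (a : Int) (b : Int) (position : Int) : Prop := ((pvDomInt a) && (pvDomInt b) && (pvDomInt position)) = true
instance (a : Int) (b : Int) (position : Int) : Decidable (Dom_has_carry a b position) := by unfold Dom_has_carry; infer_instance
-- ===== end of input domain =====

-- B replaces A's digit-by-digit carry-propagation loop by the O(1) closed form
-- a % 10^(p+1) + b % 10^(p+1) >= 10^(p+1).

-- ===== PORT A =====
-- the `for pos in range(position+1)` loop with early return at pos == position;
-- pos ranges over 0..position, so pos.toNat is exact for the exponent 10 ** pos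
def hcLoop (a : Int) (b : Int) (position : Int) : List Int → Int → Bool
  | [], _ => false
  | pos :: rest, carry =>
    let d_a := PySem.Int.mod (PySem.Int.floordiv a (10 ^ pos.toNat)) 10
    let d_b := PySem.Int.mod (PySem.Int.floordiv b (10 ^ pos.toNat)) 10
    let total := d_a + d_b + carry
    let carry' := PySem.Int.floordiv total 10
    if pos == position then decide (carry' > 0) else hcLoop a b position rest carry'

def has_carry (a : Int) (b : Int) (position : Int) : Bool :=
  hcLoop a b position (PySem.List.pyRange 0 (position + 1) 1) 0

-- ===== PORT B =====
def has_carry_alt (a : Int) (b : Int) (position : Int) : Bool :=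
  if position < 0 then false
  else
    let m : Int := 10 ^ (position + 1).toNat
    decide (PySem.Int.mod a m + PySem.Int.mod b m ≥ m)

-- ===== PRECONDITION & SPEC =====
def Spec_has_carry (a : Int) (b : Int) (position : Int) (out : Bool) : Prop := out = has_carry_alt a b position
instance (a : Int) (b : Int) (position : Int) (out : Bool) : Decidable (Spec_has_carry a b position out) := by unfold Spec_has_carry; infer_instance

-- ===== CLAIM (what is proved, stated in full; the proofs are below) =====
def Claim_equal_has_carry : Prop := ∀ (a : Int) (b : Int) (position : Int), Dom_has_carry a b position → Spec_has_carry a b position (has_carry a b position)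

-- ===== LEMMAS AND PROOFS =====

-- carry out of digit positions 0..k-1 when adding a + b
def carryC (a b : Int) (k : Nat) : Int := (a % (10 ^ k) + b % (10 ^ k)) / (10 ^ k)

theorem carryC_zero (a b : Int) : carryC a b 0 = 0 := by
  simp [carryC]

-- decompose a mod 10*M into low part and next digit
theorem emod_mul_ten (a M : Int) (hM : 0 < M) :
    a % (10 * M) = a % M + M * ((a / M) % 10) := by
  have h1 := Int.mul_ediv_add_emod a M
  have h2 := Int.mul_ediv_add_emod (a / M) 10
  have hr1 : 0 ≤ a % M := Int.emod_nonneg a (by omega)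
  have hr1' : a % M < M := Int.emod_lt_of_pos a hM
  have hd : 0 ≤ (a / M) % 10 := Int.emod_nonneg _ (by omega)
  have hd' : (a / M) % 10 < 10 := Int.emod_lt_of_pos _ (by omega)
  have key : a = (a % M + M * ((a / M) % 10)) + (10 * M) * (a / M / 10) := by
    nlinarith [h1, h2]
  have hlt : a % M + M * ((a / M) % 10) < 10 * M := by nlinarith
  have hge : 0 ≤ a % M + M * ((a / M) % 10) := by nlinarith
  calc a % (10 * M) = ((a % M + M * ((a / M) % 10)) + (10 * M) * (a / M / 10)) % (10 * M) := by
        rw [← key]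
    _ = (a % M + M * ((a / M) % 10)) % (10 * M) := by
        rw [Int.add_mul_emod_self_left]
    _ = a % M + M * ((a / M) % 10) := Int.emod_eq_of_lt hge hlt

-- one step of the carry chain in closed form
theorem carry_step (a b : Int) (k : Nat) :
    PySem.Int.floordiv
      (PySem.Int.mod (PySem.Int.floordiv a (10 ^ k)) 10 +
       PySem.Int.mod (PySem.Int.floordiv b (10 ^ k)) 10 + carryC a b k) 10
      = carryC a b (k + 1) := by
  have hM : (0:Int) < 10 ^ k := by positivity
  rw [PySem.Int.floordiv_eq_ediv_of_pos (a := a) hM,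
      PySem.Int.floordiv_eq_ediv_of_pos (a := b) hM,
      PySem.Int.mod_eq_emod_of_pos (by omega : (0:Int) < 10),
      PySem.Int.mod_eq_emod_of_pos (by omega : (0:Int) < 10),
      PySem.Int.floordiv_eq_ediv_of_pos (by omega : (0:Int) < 10)]
  set M : Int := 10 ^ k with hMdef
  have hpow : (10:Int) ^ (k + 1) = 10 * M := by rw [hMdef, pow_succ]; ring
  set dA := (a / M) % 10 with hdA
  set dB := (b / M) % 10 with hdB
  set rA := a % M with hrA
  set rB := b % M with hrB
  have hsum := Int.mul_ediv_add_emod (rA + rB) M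
  set c := (rA + rB) / M with hc
  set s := (rA + rB) % M with hs
  have hs0 : 0 ≤ s := Int.emod_nonneg _ (by omega)
  have hs1 : s < M := Int.emod_lt_of_pos _ hM
  have hda0 : 0 ≤ dA := Int.emod_nonneg _ (by omega)
  have hda1 : dA < 10 := Int.emod_lt_of_pos _ (by omega)
  have hdb0 : 0 ≤ dB := Int.emod_nonneg _ (by omega)
  have hdb1 : dB < 10 := Int.emod_lt_of_pos _ (by omega)
  have hcdiv := Int.mul_ediv_add_emod (dA + dB + c) 10
  set q := (dA + dB + c) / 10 with hq
  set r := (dA + dB + c) % 10 with hr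
  have hr0 : 0 ≤ r := Int.emod_nonneg _ (by omega)
  have hr1 : r < 10 := Int.emod_lt_of_pos _ (by omega)
  have hnum : a % (10 ^ (k + 1)) + b % (10 ^ (k + 1)) = (10 * M) * q + (M * r + s) := by
    rw [hpow, emod_mul_ten a M hM, emod_mul_ten b M hM]
    rw [← hdA, ← hdB, ← hrA, ← hrB]
    nlinarith [hsum, hcdiv]
  have hrs0 : 0 ≤ M * r + s := by nlinarith
  have hrs1 : M * r + s < 10 * M := by nlinarith
  show (dA + dB + c) / 10 = carryC a b (k + 1)
  unfold carryC
  rw [hnum, hpow, add_comm ((10 * M) * q), Int.add_mul_ediv_left _ q (by omega : (10 * M) ≠ 0),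
      Int.ediv_eq_zero_of_lt hrs0 hrs1, zero_add]

-- the loop from position k with carry carryC k computes decide (carryC (p+1) > 0)
theorem hcLoop_run (a b : Int) (p : Nat) :
    ∀ n k : Nat, k ≤ p → p - k = n →
      hcLoop a b (p : Int) (PySem.List.pyRange (k : Int) ((p : Int) + 1) 1) (carryC a b k)
        = decide (carryC a b (p + 1) > 0) := by
  intro n
  induction n with
  | zero =>
    intro k hk hn
    have hkp : k = p := by omega
    subst hkp
    rw [PySem.List.pyRange_one_cons (by exact_mod_cast (by omega : (k:Int) < (k:Int) + 1)),
        PySem.List.pyRange_one_eq_nil (by omega)]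
    simp only [hcLoop, beq_self_eq_true, if_true, Int.toNat_natCast]
    simp only [carry_step a b k]
  | succ n ih =>
    intro k hk hn
    have hklt : k < p := by omega
    rw [PySem.List.pyRange_one_cons (by exact_mod_cast (by omega : (k:Int) < (p:Int) + 1))]
    simp only [hcLoop]
    have hne : ((k : Int) == (p : Int)) = false := by
      simp only [beq_eq_false_iff_ne, ne_eq, Int.natCast_inj]; omega
    rw [hne]
    simp only [Bool.false_eq_true, if_false, Int.toNat_natCast]
    simp only [carry_step a b k]
    have : ((k : Int) + 1) = ((k + 1 : Nat) : Int) := by push_cast; ring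
    rw [this]
    exact ih (k + 1) (by omega) (by omega)

-- carry out of the whole prefix is positive iff the closed-form test holds
theorem carryC_pos_iff (a b : Int) (k : Nat) :
    (carryC a b k > 0) ↔ (a % (10 ^ k) + b % (10 ^ k) ≥ (10 ^ k : Int)) := by
  have hM : (0:Int) < 10 ^ k := by positivity
  unfold carryC
  rw [gt_iff_lt, Int.lt_iff_add_one_le, zero_add, Int.le_ediv_iff_mul_le hM, one_mul]

-- ===== VERDICT (by name: the statement is the Claim_ definition above) =====
theorem has_carry_spec : Claim_equal_has_carry := by
  intro a b position _
  unfold Spec_has_carry has_carry has_carry_alt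
  by_cases hneg : position < 0
  · rw [PySem.List.pyRange_one_eq_nil (by omega)]
    simp [hcLoop, hneg]
  · rw [not_lt] at hneg
    obtain ⟨p, rfl⟩ : ∃ p : Nat, position = (p : Int) := ⟨position.toNat, by omega⟩
    have h0 := hcLoop_run a b p p 0 (by omega) (by omega)
    simp only [Nat.cast_zero, carryC_zero] at h0
    rw [h0]
    have hp1 : ((p : Int) + 1).toNat = p + 1 := by omega
    simp only [if_neg (by omega : ¬ ((p:Int) < 0)), hp1]
    have hM : (0:Int) < 10 ^ (p + 1) := by positivity
    rw [PySem.Int.mod_eq_emod_of_pos hM, PySem.Int.mod_eq_emod_of_pos hM]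
    simp only [decide_eq_decide]
    exact carryC_pos_iff a b (p + 1)
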